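-- pv_equiv track=rewrite | github.com/muhammettan28/kangalguard-dynamic | kangal_collector.py | has_chain
-- ===== SOURCE A (Python) =====
-- def has_chain(tags: list, a: str, b: str) -> bool:
--     """tags listesinde A'dan sonra B geliyor mu?"""
--     found_a = False
--     for tag in tags:
--         if tag == a:
--             found_a = True
--         elif found_a and tag == b:
--             return True
--     return False
-- ===== SOURCE B (Python) =====
-- def has_chain(tags: list, a: str, b: str) -> bool:
--     if a == b or a not in tags or b not in tags:
--         return False
--     last_b = len(tags) - 1 - tags[::-1].index(b)
--     return tags.index(a) < last_b
-- ===== Notes on version B (the rewrite author's own statement) =====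
-- stated objective: alternative
-- what changed: Replaces A's single flag-tracking scan by an index comparison: B computes the first index of a and the last index of b (via index() on the reversed list) and returns whether first(a) < last(b), after guarding a==b and absence of either tag.
import Mathlib
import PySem

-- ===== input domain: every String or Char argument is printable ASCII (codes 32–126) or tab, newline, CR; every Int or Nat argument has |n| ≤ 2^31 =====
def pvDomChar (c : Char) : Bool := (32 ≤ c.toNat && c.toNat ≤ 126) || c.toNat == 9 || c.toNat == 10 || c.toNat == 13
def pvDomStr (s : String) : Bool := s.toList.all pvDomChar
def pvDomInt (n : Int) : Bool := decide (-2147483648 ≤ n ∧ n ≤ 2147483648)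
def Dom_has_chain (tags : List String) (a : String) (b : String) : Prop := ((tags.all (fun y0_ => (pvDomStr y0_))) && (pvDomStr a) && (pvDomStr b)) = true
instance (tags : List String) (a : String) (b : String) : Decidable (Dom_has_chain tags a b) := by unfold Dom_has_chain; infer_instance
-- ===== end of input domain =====

-- B decides the question by comparing the FIRST index of a with the LAST index of b (found by index() on the reversed list), instead of A's flag-tracking scan (objective: alternative).


-- ===== PORT A =====
-- the for-loop with the found_a flag, as structural recursion over tags carrying the flag
def hasChainLoop (tags : List String) (a : String) (b : String) (found_a : Bool) : Bool :=
  match tags with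
  | [] => false
  | tag :: rest =>
    if tag == a then hasChainLoop rest a b true
    else if found_a && tag == b then true
    else hasChainLoop rest a b found_a

def has_chain (tags : List String) (a : String) (b : String) : Bool :=
  hasChainLoop tags a b false

-- ===== PORT B =====
def has_chain_alt (tags : List String) (a : String) (b : String) : Bool :=
  if a == b || !tags.contains a || !tags.contains b then false
  else
    match PySem.List.slice? tags none none (-1) with    -- tags[::-1]
    | none => false                                      -- unreachable (step ≠ 0)
    | some rev =>
      match PySem.List.index? rev b, PySem.List.index? tags a with
      | some r, some i =>
          -- last_b = len(tags) - 1 - r;  return tags.index(a) < last_b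
          decide ((i : Int) < (tags.length : Int) - 1 - (r : Int))
      | _, _ => false                                    -- unreachable given the membership guards

-- ===== PRECONDITION & SPEC =====
def Spec_has_chain (tags : List String) (a : String) (b : String) (out : Bool) : Prop := out = has_chain_alt tags a b
instance (tags : List String) (a : String) (b : String) (out : Bool) : Decidable (Spec_has_chain tags a b out) := by unfold Spec_has_chain; infer_instance

-- ===== CLAIM =====
def Claim_equal_has_chain : Prop := ∀ (tags : List String) (a : String) (b : String), Dom_has_chain tags a b → Spec_has_chain tags a b (has_chain tags a b)

-- ===== LEMMAS AND PROOFS =====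

-- once found_a is set, the loop returns true iff some later tag equals b (and b ≠ a, else the first branch keeps eating it)
theorem hasChainLoop_true (tags : List String) (a b : String) :
    hasChainLoop tags a b true = (!(a == b) && tags.contains b) := by
  induction tags with
  | nil => simp [hasChainLoop]
  | cons t ts ih =>
    by_cases hta : t = a
    · subst hta
      by_cases hab : t = b
      · subst hab; simp [hasChainLoop, ih]
      · simp [hasChainLoop, ih, Ne.symm hab]
    · by_cases htb : t = b
      · subst htb
        simp [hasChainLoop, hta]
        intro h; exact hta h.symm
      · simp [hasChainLoop, hta, htb, Ne.symm htb, ih]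

-- the flag-scan in closed form: first index of a, then membership of b in the strict suffix
theorem hasChainLoop_closed (tags : List String) (a b : String) :
    hasChainLoop tags a b false
      = (!(a == b) && (match PySem.List.index? tags a with
                       | none => false
                       | some i => (tags.drop (i + 1)).contains b)) := by
  induction tags with
  | nil => simp [hasChainLoop, PySem.List.index?]
  | cons t ts ih =>
    by_cases hta : t = a
    · subst hta
      rw [hasChainLoop]
      simp only [beq_self_eq_true, if_true]
      rw [hasChainLoop_true, PySem.List.index?_cons_self]
      rfl
    · have ht : (t == a) = false := beq_eq_false_iff_ne.mpr hta
      rw [hasChainLoop, ht]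
      simp only [Bool.false_eq_true, if_false, Bool.false_and]
      rw [ih, PySem.List.index?_cons_of_ne _ hta]
      cases hidx : PySem.List.index? ts a with
      | none => rfl
      | some j => rfl

-- if r is the first index of b in tags.reverse, then b occurs in drop k ↔ k ≤ len-1-r
theorem drop_contains_of_rev_index (tags : List String) (b : String) (r k : ℕ)
    (hr : PySem.List.index? tags.reverse b = some r) :
    (tags.drop k).contains b = decide (k ≤ tags.length - 1 - r) := by
  obtain ⟨hrlt, hget, hfirst⟩ := PySem.List.getElem_of_index?_eq_some hr
  rw [List.length_reverse] at hrlt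
  have hL : 0 < tags.length := by omega
  have hm : tags.length - 1 - r < tags.length := by omega
  have hb : tags[tags.length - 1 - r]'hm = b := by
    rw [List.getElem_reverse] at hget
    convert hget using 2
  by_cases hk : k ≤ tags.length - 1 - r
  · have : b ∈ tags.drop k := by
      rw [List.mem_iff_getElem]
      exact ⟨tags.length - 1 - r - k, by rw [List.length_drop]; omega,
        by rw [List.getElem_drop]; rw [← hb]; congr 1; omega⟩
    simp [this, hk]
  · have : b ∉ tags.drop k := by
      intro hmem
      rw [List.mem_iff_getElem] at hmem
      obtain ⟨j, hj, hje⟩ := hmem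
      rw [List.length_drop] at hj
      rw [List.getElem_drop] at hje
      -- index k + j in tags is > len-1-r, so its reverse position is < r: contradicts first-occurrence
      have hrev : tags.reverse[tags.length - 1 - (k + j)]'(by rw [List.length_reverse]; omega) ≠ b := by
        apply hfirst
        omega
      rw [List.getElem_reverse] at hrev
      apply hrev
      convert hje using 2
      omega
    simp [this, hk]

-- ===== VERDICT =====
theorem has_chain_spec : Claim_equal_has_chain := by
  intro tags a b _
  unfold Spec_has_chain has_chain has_chain_alt
  rw [hasChainLoop_closed, PySem.List.slice?_none_none_neg_one]
  by_cases hab : a = b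
  · simp [hab]
  · have hab' : (a == b) = false := beq_eq_false_iff_ne.mpr hab
    by_cases hca : a ∈ tags
    · by_cases hcb : b ∈ tags
      · obtain ⟨i, hi⟩ := Option.isSome_iff_exists.mp ((PySem.List.index?_isSome_iff _ _).mpr hca)
        obtain ⟨r, hr⟩ := Option.isSome_iff_exists.mp
          ((PySem.List.index?_isSome_iff _ _).mpr (List.mem_reverse.mpr hcb))
        obtain ⟨hrlt, -, -⟩ := PySem.List.getElem_of_index?_eq_some hr
        rw [List.length_reverse] at hrlt
        have hga : tags.contains a = true := by simp [hca]
        have hgb : tags.contains b = true := by simp [hcb]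
        simp only [hi, hr, hab', hga, hgb, Bool.not_false, Bool.not_true, Bool.or_false,
          Bool.true_and, Bool.false_eq_true, if_false]
        rw [drop_contains_of_rev_index tags b r (i + 1) hr]
        simp only [decide_eq_decide]
        omega
      · have hgb : tags.contains b = false := by simp [hcb]
        rw [hab', hgb]
        simp only [Bool.not_false, Bool.false_or, Bool.or_true, if_true]
        cases hi : PySem.List.index? tags a with
        | none => simp
        | some i =>
          have hnb : b ∉ tags.drop (i + 1) := fun h => hcb (List.mem_of_mem_drop h)
          simp [hnb]
    · have hna : PySem.List.index? tags a = none := (PySem.List.index?_eq_none_iff _ _).mpr hca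
      have hga : tags.contains a = false := by simp [hca]
      rw [hna, hab', hga]
      simp
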